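-- pv_equiv track=rewrite | github.com/vigneshsabapathi/python-algorithms | maths/is_square_free_optimized.py | sf_sieve_build
-- ===== SOURCE A (Python) =====
-- def sf_sieve_build(limit):
--     """Precompute square-free flags up to limit."""
--     sf = [True] * (limit + 1)
--     sf[0] = False
--     i = 2
--     while i * i <= limit:
--         sq = i * i
--         for j in range(sq, limit + 1, sq):
--             sf[j] = False
--         i += 1
--     return sf
-- ===== SOURCE B (Python) =====
-- def sf_sieve_build(limit):
--     """Precompute square-free flags up to limit, marking only with squares of primes."""
--     r = 1
--     while (r + 1) * (r + 1) <= limit: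
--         r += 1
--     primes = [p for p in range(2, r + 1) if all(p % d for d in range(2, p))]
--     sf = [True] * (limit + 1)
--     sf[0] = False
--     for p in primes:
--         sq = p * p
--         sf[sq::sq] = [False] * (limit // sq)
--     return sf
-- ===== Notes on version B (the rewrite author's own statement) =====
-- stated objective: alternative
-- what changed: Marks non-square-free entries only with squares of primes (prime list up to isqrt(limit) by trial division, bulk slice assignment for the marking) instead of squares of every integer i with i*i <= limit.
import Mathlib
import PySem

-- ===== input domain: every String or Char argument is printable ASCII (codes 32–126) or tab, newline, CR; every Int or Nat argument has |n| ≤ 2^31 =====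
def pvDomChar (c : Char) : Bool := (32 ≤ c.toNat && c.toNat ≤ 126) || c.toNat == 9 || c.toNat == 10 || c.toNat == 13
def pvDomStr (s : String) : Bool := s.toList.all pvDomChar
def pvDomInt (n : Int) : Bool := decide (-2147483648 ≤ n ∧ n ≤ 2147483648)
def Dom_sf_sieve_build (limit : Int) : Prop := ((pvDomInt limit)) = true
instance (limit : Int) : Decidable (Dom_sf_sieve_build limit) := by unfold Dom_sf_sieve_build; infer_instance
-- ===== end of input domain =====

-- B marks non-square-free entries only with squares of PRIMES up to isqrt(limit)
-- (trial-division prime list + bulk slice marking) instead of squares of every i.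

-- ===== PORT A =====
-- while i * i <= limit: mark every multiple of i*i as not square-free, i += 1
def sfLoop (limit i : Int) (sf : List Bool) : List Bool :=
  if i * i ≤ limit then
    sfLoop limit (i + 1)
      ((PySem.List.pyRange (i * i) (limit + 1) (i * i)).foldl
        (fun s j => PySem.List.pySetD s j false) sf)
  else sf
termination_by (limit + 1 - i).toNat
decreasing_by
  rename_i h
  have hi : i ≤ limit := by
    by_cases h0 : i ≤ 0
    · have := mul_self_nonneg i; omega
    · have : i * 1 ≤ i * i := by
        apply mul_le_mul_of_nonneg_left (by omega) (by omega)
      omega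
  omega

def sf_sieve_build (limit : Int) : List Bool :=
  -- sf = [True] * (limit + 1); sf[0] = False  (IndexError for limit < 0: Pre_ requires 0 ≤ limit)
  sfLoop limit 2 (PySem.List.pySetD (List.replicate (limit + 1).toNat true) 0 false)

-- ===== PORT B =====
-- r = 1; while (r + 1) * (r + 1) <= limit: r += 1
def rLoop (limit r : Int) : Int :=
  if (r + 1) * (r + 1) ≤ limit then rLoop limit (r + 1) else r
termination_by (limit - r).toNat
decreasing_by
  rename_i h
  have hr : r < limit := by
    by_cases h0 : r + 1 ≤ 0
    · have := mul_self_nonneg (r + 1); omega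
    · have : (r + 1) * 1 ≤ (r + 1) * (r + 1) := by
        apply mul_le_mul_of_nonneg_left (by omega) (by omega)
      omega
  omega

-- primes = [p for p in range(2, r + 1) if all(p % d for d in range(2, p))]
def primesOf (limit : Int) : List Int :=
  (PySem.List.pyRange 2 (rLoop limit 1 + 1) 1).filter
    (fun p => (PySem.List.pyRange 2 p 1).all (fun d => PySem.Int.mod p d != 0))

def sf_sieve_build_alt (limit : Int) : List Bool :=
  -- sf = [True] * (limit + 1); sf[0] = False  (IndexError for limit < 0, outside Pre_)
  -- sf[sq::sq] = [False] * (limit // sq) is ported by hand, element by element: it sets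
  -- exactly the indices sq, 2*sq, … ≤ limit to False, which is the foldl below (exact for sq ≥ 1).
  (primesOf limit).foldl
    (fun s p =>
      (PySem.List.pyRange (p * p) (limit + 1) (p * p)).foldl
        (fun s' j => PySem.List.pySetD s' j false) s)
    (PySem.List.pySetD (List.replicate (limit + 1).toNat true) 0 false)

-- ===== PRECONDITION & SPEC =====
-- A raises IndexError on limit < 0 (sf[0] = False on the empty list); those inputs are excluded.
def Pre_sf_sieve_build (limit : Int) : Prop := 0 ≤ limit
instance (limit : Int) : Decidable (Pre_sf_sieve_build limit) := by
  unfold Pre_sf_sieve_build; infer_instance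

def pvWitness_sf_sieve_build : Int := (10)

def Spec_sf_sieve_build (limit : Int) (out : List Bool) : Prop := out = sf_sieve_build_alt limit
instance (limit : Int) (out : List Bool) : Decidable (Spec_sf_sieve_build limit out) := by
  unfold Spec_sf_sieve_build; infer_instance

-- ===== CLAIM (what is proved, stated in full; the proofs are below) =====
def Claim_equal_sf_sieve_build : Prop :=
  ∀ (limit : Int), Dom_sf_sieve_build limit → Pre_sf_sieve_build limit →
    Spec_sf_sieve_build limit (sf_sieve_build limit)

-- ===== LEMMAS AND PROOFS =====

theorem le_of_sq_le {i m : Int} (h2 : 2 ≤ i) (hm : i ≤ m) : i * i ≤ m * m := by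
  have := mul_le_mul hm hm (by omega) (by omega)
  exact this

theorem length_foldl_set (js : List Int) (sf : List Bool) :
    (js.foldl (fun s j => PySem.List.pySetD s j false) sf).length = sf.length := by
  induction js generalizing sf with
  | nil => rfl
  | cons j rest ih =>
    simp only [List.foldl_cons]
    rw [ih, PySem.List.length_pySetD]

theorem getD_foldl_set (js : List Int) (sf : List Bool) (k : Nat)
    (hjs : ∀ j ∈ js, 0 ≤ j ∧ j.toNat < sf.length) :
    ((js.foldl (fun s j => PySem.List.pySetD s j false) sf).getD k true = false ↔
      (sf.getD k true = false ∨ (k : Int) ∈ js)) := by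
  induction js generalizing sf with
  | nil => simp
  | cons j rest ih =>
    have hj := hjs j (by simp)
    simp only [List.foldl_cons]
    rw [ih _ (fun x hx => by
      have := hjs x (by simp [hx])
      rwa [PySem.List.length_pySetD])]
    rw [PySem.List.pySetD_of_nonneg _ _ hj.1]
    have hset : ((sf.set j.toNat false).getD k true = false) ↔
        (sf.getD k true = false ∨ (k : Int) = j) := by
      by_cases hk : k = j.toNat
      · subst hk
        simp only [List.getD]
        rw [List.getElem?_set_self hj.2]
        exact ⟨fun _ => Or.inr (by omega), fun _ => rfl⟩
      · simp only [List.getD]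
        rw [List.getElem?_set_ne (by omega : j.toNat ≠ k)]
        constructor
        · intro h; exact Or.inl h
        · rintro (h | h)
          · exact h
          · exfalso; omega
    rw [hset]
    simp only [List.mem_cons]
    tauto

theorem mem_sq_range_iff (limit i : Int) (k : Nat) (h2 : 2 ≤ i) :
    ((k : Int) ∈ PySem.List.pyRange (i * i) (limit + 1) (i * i)) ↔
      ((i * i ∣ (k : Int)) ∧ k ≠ 0 ∧ (k : Int) ≤ limit) := by
  have hsq : (0 : Int) < i * i := by positivity
  rw [PySem.List.mem_pyRange_iff_of_pos hsq]
  constructor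
  · rintro ⟨h1, h3, h4⟩
    have hd : i * i ∣ (k : Int) := by
      have := h4.add (dvd_refl (i * i))
      simpa using this
    refine ⟨hd, ?_, by omega⟩
    intro hk; subst hk; simp at h1; omega
  · rintro ⟨hd, hk0, hkl⟩
    have hkpos : (0 : Int) < (k : Int) := by
      have : (0:Int) ≤ (k:Int) := Int.natCast_nonneg k
      omega
    have hge : i * i ≤ (k : Int) := Int.le_of_dvd hkpos hd
    exact ⟨hge, by omega, hd.sub (dvd_refl _)⟩

theorem length_sfLoop (limit i : Int) (sf : List Bool) :
    (sfLoop limit i sf).length = sf.length := by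
  fun_induction sfLoop limit i sf with
  | case1 i sf h ih => rw [ih, length_foldl_set]
  | case2 i sf h => rfl

theorem sfLoop_getD (limit : Int) (hl : 0 ≤ limit) (i : Int) (sf : List Bool)
    (h2 : 2 ≤ i) (hlen : sf.length = (limit + 1).toNat) (k : Nat) :
    ((sfLoop limit i sf).getD k true = false ↔
      (sf.getD k true = false ∨
        ((k : Int) ≤ limit ∧ k ≠ 0 ∧ ∃ m : Int, i ≤ m ∧ m * m ≤ limit ∧ m * m ∣ (k : Int)))) := by
  fun_induction sfLoop limit i sf with
  | case1 i sf h ih =>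
    have hjs : ∀ j ∈ PySem.List.pyRange (i * i) (limit + 1) (i * i),
        0 ≤ j ∧ j.toNat < sf.length := by
      intro j hj
      have hsq : (0 : Int) < i * i := by positivity
      rw [PySem.List.mem_pyRange_iff_of_pos hsq] at hj
      constructor
      · omega
      · omega
    rw [ih (by omega) (by rw [length_foldl_set]; exact hlen)]
    rw [getD_foldl_set _ _ _ hjs]
    rw [mem_sq_range_iff limit i k h2]
    constructor
    · rintro ((hsf | ⟨hd, hk0, hkl⟩) | ⟨hkl, hk0, m, hm1, hm2, hm3⟩)
      · exact Or.inl hsf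
      · exact Or.inr ⟨hkl, hk0, i, le_refl i, h, hd⟩
      · exact Or.inr ⟨hkl, hk0, m, by omega, hm2, hm3⟩
    · rintro (hsf | ⟨hkl, hk0, m, hm1, hm2, hm3⟩)
      · exact Or.inl (Or.inl hsf)
      · rcases eq_or_lt_of_le hm1 with heq | hlt
        · exact Or.inl (Or.inr ⟨heq ▸ hm3, hk0, hkl⟩)
        · exact Or.inr ⟨hkl, hk0, m, by omega, hm2, hm3⟩
  | case2 i sf h =>
    constructor
    · exact Or.inl
    · rintro (hsf | ⟨hkl, hk0, m, hm1, hm2, hm3⟩)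
      · exact hsf
      · exfalso
        have := le_of_sq_le h2 hm1
        omega

theorem init_getD (limit : Int) (k : Nat) (hk : k < (limit + 1).toNat) :
    ((PySem.List.pySetD (List.replicate (limit + 1).toNat true) 0 false).getD k true = false ↔
      k = 0) := by
  rw [PySem.List.pySetD_of_nonneg _ _ (le_refl 0)]
  by_cases hk0 : k = 0
  · subst hk0
    simp only [List.getD, Int.toNat_zero]
    rw [List.getElem?_set_self (by simpa using hk)]
    simp
  · simp only [List.getD, Int.toNat_zero]
    rw [List.getElem?_set_ne (by omega)]
    rw [List.getElem?_replicate, if_pos hk]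
    simp [hk0]

theorem a_getD (limit : Int) (hl : 0 ≤ limit) (k : Nat) (hk : k < (limit + 1).toNat) :
    ((sf_sieve_build limit).getD k true = false ↔
      (k = 0 ∨ ∃ m : Int, 2 ≤ m ∧ m * m ≤ (k : Int) ∧ m * m ∣ (k : Int))) := by
  unfold sf_sieve_build
  rw [sfLoop_getD limit hl 2 _ (le_refl 2)
      (by rw [PySem.List.length_pySetD]; simp) k]
  rw [init_getD limit k hk]
  have hkle : (k : Int) ≤ limit := by omega
  constructor
  · rintro (h0 | ⟨_, hk0, m, hm1, hm2, hm3⟩)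
    · exact Or.inl h0
    · have hkpos : (0 : Int) < (k : Int) := by
        have : (0:Int) ≤ (k:Int) := Int.natCast_nonneg k
        omega
      exact Or.inr ⟨m, hm1, Int.le_of_dvd hkpos hm3, hm3⟩
  · rintro (h0 | ⟨m, hm1, hm2, hm3⟩)
    · exact Or.inl h0
    · by_cases hk0 : k = 0
      · exact Or.inl hk0
      · exact Or.inr ⟨hkle, hk0, m, hm1, by omega, hm3⟩

theorem rLoop_le_iff (limit r : Int) :
    1 ≤ r → (∀ q : Int, 2 ≤ q → q ≤ r → q * q ≤ limit) →
    ∀ p : Int, 2 ≤ p → (p ≤ rLoop limit r ↔ p * p ≤ limit) := by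
  fun_induction rLoop limit r with
  | case1 r h ih =>
    intro hr inv p h2
    refine ih (by omega) ?_ p h2
    intro q hq1 hq2
    rcases eq_or_lt_of_le hq2 with heq | hlt
    · rw [heq]; exact h
    · exact inv q hq1 (by omega)
  | case2 r h =>
    intro hr inv p h2
    constructor
    · intro hpr; exact inv p h2 hpr
    · intro hpp
      by_contra hgt
      have : (r + 1) * (r + 1) ≤ p * p := by
        apply mul_le_mul (by omega) (by omega) (by omega) (by omega)
      omega

theorem mem_primesOf (limit p : Int) :
    (p ∈ primesOf limit ↔
      (2 ≤ p ∧ p ≤ rLoop limit 1 ∧ ∀ d : Int, 2 ≤ d → d < p → ¬ d ∣ p)) := by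
  unfold primesOf
  rw [List.mem_filter, PySem.List.mem_pyRange_one]
  constructor
  · rintro ⟨⟨h1, h2⟩, hall⟩
    refine ⟨h1, by omega, ?_⟩
    intro d hd1 hd2 hdvd
    have hmem : d ∈ PySem.List.pyRange 2 p 1 := by
      rw [PySem.List.mem_pyRange_one]; omega
    have := List.all_eq_true.mp hall d hmem
    simp only [bne_iff_ne, ne_eq] at this
    exact this ((PySem.Int.mod_eq_zero_iff_dvd p d).mpr hdvd)
  · rintro ⟨h1, h2, hnd⟩
    refine ⟨⟨h1, by omega⟩, ?_⟩
    rw [List.all_eq_true]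
    intro d hd
    rw [PySem.List.mem_pyRange_one] at hd
    simp only [bne_iff_ne, ne_eq]
    intro hmod
    exact hnd d (by omega) (by omega) ((PySem.Int.mod_eq_zero_iff_dvd p d).mp hmod)

theorem exists_prime_sq (limit k : Int) :
    ((∃ m : Int, 2 ≤ m ∧ m * m ≤ limit ∧ m * m ∣ k) ↔
      (∃ p ∈ primesOf limit, p * p ∣ k)) := by
  have hr := rLoop_le_iff limit 1 (le_refl 1) (by intro q hq1 hq2; omega)
  constructor
  · rintro ⟨m, hm2, hmle, hmdvd⟩
    have hMm : ((m.toNat : Int)) = m := Int.toNat_of_nonneg (by omega)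
    have hMne1 : m.toNat ≠ 1 := by omega
    have hp2 : 2 ≤ Nat.minFac m.toNat := (Nat.minFac_prime hMne1).two_le
    have hpd : Nat.minFac m.toNat ∣ m.toNat := Nat.minFac_dvd m.toNat
    have hple : Nat.minFac m.toNat ≤ m.toNat := Nat.minFac_le (by omega)
    have hpdZ : ((Nat.minFac m.toNat : Int)) ∣ m := by
      rw [← hMm]; exact_mod_cast hpd
    have hsq : ((Nat.minFac m.toNat : Int)) * (Nat.minFac m.toNat : Int) ≤ limit := by
      have h1 : ((Nat.minFac m.toNat : Int)) * (Nat.minFac m.toNat : Int) ≤ m * m := by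
        apply mul_le_mul (by omega) (by omega) (by omega) (by omega)
      omega
    refine ⟨(Nat.minFac m.toNat : Int), ?_, ?_⟩
    · rw [mem_primesOf]
      refine ⟨by exact_mod_cast hp2, (hr _ (by exact_mod_cast hp2)).mpr hsq, ?_⟩
      intro d hd1 hd2 hdvd
      have hdn : d.toNat ∣ Nat.minFac m.toNat := by
        have hdm : ((d.toNat : Int)) = d := Int.toNat_of_nonneg (by omega)
        rw [← hdm] at hdvd; exact_mod_cast hdvd
      have := Nat.minFac_le_of_dvd (by omega : 2 ≤ d.toNat) (hdn.trans hpd)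
      omega
    · exact dvd_trans (mul_dvd_mul hpdZ hpdZ) hmdvd
  · rintro ⟨p, hpmem, hpdvd⟩
    rw [mem_primesOf] at hpmem
    exact ⟨p, hpmem.1, (hr p hpmem.1).mp hpmem.2.1, hpdvd⟩

theorem length_markFold (limit : Int) (ps : List Int) (sf : List Bool) :
    ((ps.foldl
      (fun s p =>
        (PySem.List.pyRange (p * p) (limit + 1) (p * p)).foldl
          (fun s' j => PySem.List.pySetD s' j false) s) sf).length = sf.length) := by
  induction ps generalizing sf with
  | nil => rfl
  | cons p rest ih =>
    simp only [List.foldl_cons]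
    rw [ih, length_foldl_set]

theorem markFold_getD (limit : Int) (hl : 0 ≤ limit) (ps : List Int) (sf : List Bool)
    (hps : ∀ p ∈ ps, 2 ≤ p) (hlen : sf.length = (limit + 1).toNat) (k : Nat) :
    (((ps.foldl
      (fun s p =>
        (PySem.List.pyRange (p * p) (limit + 1) (p * p)).foldl
          (fun s' j => PySem.List.pySetD s' j false) s) sf).getD k true = false) ↔
      (sf.getD k true = false ∨
        ∃ p ∈ ps, (p * p ∣ (k : Int) ∧ k ≠ 0 ∧ (k : Int) ≤ limit))) := by
  induction ps generalizing sf with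
  | nil => simp
  | cons p rest ih =>
    have hp2 := hps p (by simp)
    simp only [List.foldl_cons]
    rw [ih _ (fun x hx => hps x (by simp [hx])) (by rw [length_foldl_set]; exact hlen)]
    have hjs : ∀ j ∈ PySem.List.pyRange (p * p) (limit + 1) (p * p),
        0 ≤ j ∧ j.toNat < sf.length := by
      intro j hj
      have hsq : (0 : Int) < p * p := by positivity
      rw [PySem.List.mem_pyRange_iff_of_pos hsq] at hj
      constructor
      · omega
      · omega
    rw [getD_foldl_set _ _ _ hjs]
    rw [mem_sq_range_iff limit p k hp2]
    constructor
    · rintro ((hsf | ⟨hd, hn0, hle⟩) | ⟨q, hq1, hq2⟩)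
      · exact Or.inl hsf
      · exact Or.inr ⟨p, by simp, hd, hn0, hle⟩
      · exact Or.inr ⟨q, by simp [hq1], hq2⟩
    · rintro (hsf | ⟨q, hq1, hq2⟩)
      · exact Or.inl (Or.inl hsf)
      · rcases List.mem_cons.mp hq1 with heq | hmem
        · exact Or.inl (Or.inr (heq ▸ hq2))
        · exact Or.inr ⟨q, hmem, hq2⟩

theorem b_getD (limit : Int) (hl : 0 ≤ limit) (k : Nat) (hk : k < (limit + 1).toNat) :
    ((sf_sieve_build_alt limit).getD k true = false ↔
      (k = 0 ∨ ∃ p ∈ primesOf limit, p * p ∣ (k : Int))) := by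
  unfold sf_sieve_build_alt
  rw [markFold_getD limit hl _ _ (fun p hp => ((mem_primesOf limit p).mp hp).1)
      (by rw [PySem.List.length_pySetD]; simp) k]
  rw [init_getD limit k hk]
  have hkle : (k : Int) ≤ limit := by omega
  constructor
  · rintro (h0 | ⟨p, hp1, hp2, _, _⟩)
    · exact Or.inl h0
    · exact Or.inr ⟨p, hp1, hp2⟩
  · rintro (h0 | ⟨p, hp1, hp2⟩)
    · exact Or.inl h0
    · by_cases hk0 : k = 0
      · exact Or.inl hk0
      · exact Or.inr ⟨p, hp1, hp2, hk0, hkle⟩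

-- ===== VERDICT (by name: the statement is the Claim_ definition above) =====
theorem sf_sieve_build_spec : Claim_equal_sf_sieve_build := by
  intro limit _ hpre
  unfold Spec_sf_sieve_build
  have hl : 0 ≤ limit := hpre
  have hlenA : (sf_sieve_build limit).length = (limit + 1).toNat := by
    unfold sf_sieve_build
    rw [length_sfLoop, PySem.List.length_pySetD]
    simp
  have hlenB : (sf_sieve_build_alt limit).length = (limit + 1).toNat := by
    unfold sf_sieve_build_alt
    rw [length_markFold, PySem.List.length_pySetD]
    simp
  apply List.ext_getElem (by rw [hlenA, hlenB])
  intro k hk1 hk2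
  have hk : k < (limit + 1).toNat := by omega
  have hA := a_getD limit hl k hk
  have hB := b_getD limit hl k hk
  have hbridge : ((k = 0 ∨ ∃ m : Int, 2 ≤ m ∧ m * m ≤ (k : Int) ∧ m * m ∣ (k : Int)) ↔
      (k = 0 ∨ ∃ p ∈ primesOf limit, p * p ∣ (k : Int))) := by
    by_cases hk0 : k = 0
    · simp [hk0]
    · have hkpos : (0 : Int) < (k : Int) := by clear hA hB; omega
      have hkle : (k : Int) ≤ limit := by clear hA hB; omega
      have hps := exists_prime_sq limit (k : Int)
      constructor
      · rintro (h0 | ⟨m, hm2, hmle, hmd⟩)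
        · exact absurd h0 hk0
        · have hml : m * m ≤ limit := le_trans hmle hkle
          exact Or.inr (hps.mp ⟨m, hm2, hml, hmd⟩)
      · rintro (h0 | hp)
        · exact absurd h0 hk0
        · obtain ⟨m, hm2, hmle, hmd⟩ := hps.mpr hp
          have hmk : m * m ≤ (k : Int) := Int.le_of_dvd hkpos hmd
          exact Or.inr ⟨m, hm2, hmk, hmd⟩
  rw [List.getD_eq_getElem _ _ hk1] at hA
  rw [List.getD_eq_getElem _ _ hk2] at hB
  have hiff := hA.trans (hbridge.trans hB.symm)
  cases hx : (sf_sieve_build limit)[k] <;> cases hy : (sf_sieve_build_alt limit)[k] <;> simp_all
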